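-- pv_equiv track=rewrite | github.com/foundry-works/foundry-sandbox | foundry-git-safety/foundry_git_safety/push_validation.py | strip_credential_config_overrides
-- ===== SOURCE A (Python) =====
-- def strip_credential_config_overrides(
--     args: list[str],
-- ) -> tuple[list[str], bool]:
--     """Strip ``-c credential.*=...`` config overrides from git args.
--
--     GitHub CLI (``gh``) and other tools inject ``-c credential.helper=...``
--     overrides into their internal git commands.  The proxy's
--     ``CONFIG_NEVER_ALLOW`` blocklist rejects these, causing the entire
--     command to fail.
--
--     Since the proxy manages credentials independently (via
--     ``FOUNDRY_PROXY_GIT_TOKEN`` and the credential-helper script installed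
--     in ``entrypoint.sh``), client-side credential overrides are redundant
--     and safe to remove.
--
--     Args:
--         args: Full git argument list (without the ``git`` binary itself).
--
--     Returns:
--         ``(args, True)`` if any overrides were stripped,
--         ``(args, False)`` otherwise.  The original list is never mutated.
--     """
--     stripped: list[str] = []
--     changed = False
--     idx = 0
--     while idx < len(args):
--         arg = args[idx]
--         # -c key=value (separate args)
--         if arg == "-c" and idx + 1 < len(args):
--             pair = args[idx + 1]
--             key = pair.split("=", 1)[0] if "=" in pair else pair
--             if key.startswith("credential.") or key == "credential":
--                 idx += 2
--                 changed = True
--                 continue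
--             stripped.extend([arg, pair])
--             idx += 2
--             continue
--         # -ckey=value (combined form)
--         if arg.startswith("-c") and len(arg) > 2:
--             pair = arg[2:]
--             key = pair.split("=", 1)[0] if "=" in pair else pair
--             if key.startswith("credential.") or key == "credential":
--                 idx += 1
--                 changed = True
--                 continue
--             stripped.append(arg)
--             idx += 1
--             continue
--         stripped.append(arg)
--         idx += 1
--     return stripped, changed
-- ===== SOURCE B (Python) =====
-- def strip_credential_config_overrides(
--     args: list[str],
-- ) -> tuple[list[str], bool]:
--     """Tokenize-filter-flatten re-implementation; never mutates the input."""
--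
--     def is_cred(pair: str) -> bool:
--         key = pair.split("=", 1)[0] if "=" in pair else pair
--         return key.startswith("credential.") or key == "credential"
--
--     def drops(tok: tuple) -> bool:
--         if len(tok) == 2:
--             return is_cred(tok[1])
--         a = tok[0]
--         return a.startswith("-c") and len(a) > 2 and is_cred(a[2:])
--
--     # Phase 1: group '-c key=value' argument pairs into one token each.
--     tokens: list[tuple] = []
--     i = 0
--     while i < len(args):
--         if args[i] == "-c" and i + 1 < len(args):
--             tokens.append((args[i], args[i + 1]))
--             i += 2
--         else:
--             tokens.append((args[i],))
--             i += 1
--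
--     # Phase 2: filter out credential tokens; Phase 3: flatten the survivors.
--     kept = [t for t in tokens if not drops(t)]
--     changed = any(drops(t) for t in tokens)
--     flat = [x for t in kept for x in t]
--     return flat, changed
-- ===== Notes on version B (the rewrite author's own statement) =====
-- stated objective: alternative
-- what changed: Replaces A's single index-driven while loop with in-loop appends and a changed flag by a three-phase tokenize/filter/flatten pipeline: group '-c' pairs into tokens once, then drop credential tokens with a pure predicate via filter/any, then flatten.
import Mathlib
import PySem

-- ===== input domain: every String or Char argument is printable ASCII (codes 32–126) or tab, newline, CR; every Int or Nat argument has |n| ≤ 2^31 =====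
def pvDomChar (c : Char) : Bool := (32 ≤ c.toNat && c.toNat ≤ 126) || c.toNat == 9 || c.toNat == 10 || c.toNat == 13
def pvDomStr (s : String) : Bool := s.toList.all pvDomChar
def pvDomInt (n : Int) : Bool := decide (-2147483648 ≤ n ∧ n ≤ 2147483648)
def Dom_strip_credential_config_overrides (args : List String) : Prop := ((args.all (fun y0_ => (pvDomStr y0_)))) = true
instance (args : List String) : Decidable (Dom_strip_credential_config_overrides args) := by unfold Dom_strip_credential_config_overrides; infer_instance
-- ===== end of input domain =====

-- B replaces A's single index-driven scan by a tokenize/filter/flatten pipeline (alternative decomposition, same cost).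


-- ===== PORT A =====
-- key = pair.split("=", 1)[0] if "=" in pair else pair  (the [0] of a non-empty split; fallback unreachable)
def pvKeyA (pair : String) : String :=
  if PySem.Str.isIn "=" pair then
    match PySem.Str.splitMax? pair "=" 1 with
    | some (k :: _) => k
    | _ => pair
  else pair

-- the while loop of A, one recursive step per iteration, same accumulators (stripped, changed)
def pvGoA : List String → List String → Bool → List String × Bool
  | [], stripped, changed => (stripped, changed)
  | "-c" :: pair :: rest, stripped, changed =>
      if PySem.Str.startswith (pvKeyA pair) "credential." || pvKeyA pair == "credential" then
        pvGoA rest stripped true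
      else
        pvGoA rest (stripped ++ ["-c", pair]) changed
  | arg :: rest, stripped, changed =>
      if PySem.Str.startswith arg "-c" && decide ((2:Int) < PySem.Str.len arg) then
        if PySem.Str.startswith (pvKeyA (PySem.Str.slice arg (some 2) none)) "credential."
            || pvKeyA (PySem.Str.slice arg (some 2) none) == "credential" then
          pvGoA rest stripped true
        else
          pvGoA rest (stripped ++ [arg]) changed
      else
        pvGoA rest (stripped ++ [arg]) changed

def strip_credential_config_overrides (args : List String) : List String × Bool :=
  pvGoA args [] false

-- ===== PORT B =====
inductive PvTok
  | single : String → PvTok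
  | grouped : String → String → PvTok
deriving DecidableEq, Repr

def pvIsCred (pair : String) : Bool :=
  let key :=
    if PySem.Str.isIn "=" pair then
      match PySem.Str.splitMax? pair "=" 1 with
      | some (k :: _) => k
      | _ => pair
    else pair
  PySem.Str.startswith key "credential." || key == "credential"

def pvDrops : PvTok → Bool
  | .grouped _ p => pvIsCred p
  | .single a =>
      PySem.Str.startswith a "-c" && decide ((2:Int) < PySem.Str.len a)
        && pvIsCred (PySem.Str.slice a (some 2) none)

def pvFlatTok : PvTok → List String
  | .single a => [a]
  | .grouped a p => [a, p]

-- Phase 1: group '-c key=value' argument pairs into one token each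
def pvTokenize : List String → List PvTok
  | [] => []
  | "-c" :: p :: rest => .grouped "-c" p :: pvTokenize rest
  | a :: rest => .single a :: pvTokenize rest

def strip_credential_config_overrides_alt (args : List String) : List String × Bool :=
  let tokens := pvTokenize args
  let kept := tokens.filter (fun t => !pvDrops t)
  let changed := tokens.any pvDrops
  (kept.flatMap pvFlatTok, changed)

-- ===== PRECONDITION & SPEC =====
def Spec_strip_credential_config_overrides (args : List String) (out : List String × Bool) : Prop := out = strip_credential_config_overrides_alt args
instance (args : List String) (out : List String × Bool) : Decidable (Spec_strip_credential_config_overrides args out) := by unfold Spec_strip_credential_config_overrides; infer_instance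

-- ===== CLAIM (what is proved, stated in full; the proofs are below) =====
def Claim_equal_strip_credential_config_overrides : Prop := ∀ (args : List String), Dom_strip_credential_config_overrides args → Spec_strip_credential_config_overrides args (strip_credential_config_overrides args)

-- ===== LEMMAS AND PROOFS =====

lemma pvIsCred_eq (p : String) :
    pvIsCred p = (PySem.Str.startswith (pvKeyA p) "credential." || pvKeyA p == "credential") := rfl

lemma pvDrops_grouped (a p : String) : pvDrops (PvTok.grouped a p) = pvIsCred p := rfl

lemma pvDrops_single (a : String) :
    pvDrops (PvTok.single a) =
      (PySem.Str.startswith a "-c" && decide ((2:Int) < PySem.Str.len a)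
        && pvIsCred (PySem.Str.slice a (some 2) none)) := rfl

lemma pvTokenize_single (a : String) (rest : List String)
    (h : ∀ (p : String) (r : List String), a = "-c" → rest = p :: r → False) :
    pvTokenize (a :: rest) = PvTok.single a :: pvTokenize rest := by
  rw [pvTokenize.eq_def]
  split
  · rename_i heq; exact absurd heq (by simp)
  · rename_i p r heq
    injection heq with h1 h2
    exact (h p r h1 h2).elim
  · rename_i heq
    injection heq with e1 e2
    subst e1; subst e2; rfl

lemma pvGoA_eq (args : List String) (st : List String) (ch : Bool) :
    pvGoA args st ch =
      (st ++ ((pvTokenize args).filter (fun t => !pvDrops t)).flatMap pvFlatTok,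
       ch || (pvTokenize args).any pvDrops) := by
  fun_induction pvGoA args st ch with
  | case1 st ch => simp [pvTokenize]
  | case2 pair rest st ch h ih =>
      have hd : pvDrops (PvTok.grouped "-c" pair) = true := by
        rw [pvDrops_grouped, pvIsCred_eq]; exact h
      rw [ih, pvTokenize]
      simp [List.any_cons, hd]
  | case3 pair rest st ch h ih =>
      have hd : pvDrops (PvTok.grouped "-c" pair) = false := by
        rw [pvDrops_grouped, pvIsCred_eq]; simpa using h
      rw [ih, pvTokenize]
      simp [List.any_cons, hd, pvFlatTok]
  | case4 arg rest st ch hne h1 h2 ih =>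
      have hd : pvDrops (PvTok.single arg) = true := by
        rw [pvDrops_single, h1, Bool.true_and, pvIsCred_eq]; exact h2
      rw [ih, pvTokenize_single _ _ hne]
      simp [List.any_cons, hd]
  | case5 arg rest st ch hne h1 h2 ih =>
      have hd : pvDrops (PvTok.single arg) = false := by
        rw [pvDrops_single, h1, Bool.true_and, pvIsCred_eq]; simpa using h2
      rw [ih, pvTokenize_single _ _ hne]
      simp [List.any_cons, hd, pvFlatTok]
  | case6 arg rest st ch hne h1 ih =>
      have hd : pvDrops (PvTok.single arg) = false := by
        have h1' : (PySem.Str.startswith arg "-c" && decide ((2:Int) < PySem.Str.len arg)) = false := by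
          simpa using h1
        rw [pvDrops_single, h1', Bool.false_and]
      rw [ih, pvTokenize_single _ _ hne]
      simp [List.any_cons, hd, pvFlatTok]

-- ===== VERDICT (by name: the statement is the Claim_ definition above) =====
theorem strip_credential_config_overrides_spec : Claim_equal_strip_credential_config_overrides := by
  intro args _
  show _ = _
  simp [strip_credential_config_overrides, strip_credential_config_overrides_alt, pvGoA_eq]
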